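-- pv_equiv track=rewrite | github.com/HawzhinBlanca/Montage | backup_removed_fake_components/narrative_detector.py | _validate_narrative_structure
-- ===== SOURCE A (Python) =====
-- from typing import List, Dict, Tuple, Optional
--
-- def _validate_narrative_structure(
--
--     hooks: List[Dict],
--     climaxes: List[Dict],
--     resolutions: List[Dict],
--     total_duration: int,
-- ) -> Dict:
--     """Validate and adjust narrative structure for coherence"""
--
--     # Ensure temporal ordering
--     all_beats = []
--     all_beats.extend([(beat, "hook") for beat in hooks])
--     all_beats.extend([(beat, "climax") for beat in climaxes])
--     all_beats.extend([(beat, "resolution") for beat in resolutions])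
--
--     # Sort by timestamp
--     all_beats.sort(key=lambda x: x[0]["start_ms"])
--
--     # Validate structure rules
--     validated = {"hooks": [], "climaxes": [], "resolutions": []}
--
--     for beat, beat_type in all_beats:
--         timestamp = beat["start_ms"]
--         position_ratio = timestamp / total_duration if total_duration > 0 else 0
--
--         # Apply position rules
--         if beat_type == "hook" and position_ratio < 0.4:  # Hooks in first 40%
--             validated["hooks"].append(beat)
--         elif (
--             beat_type == "climax" and 0.2 < position_ratio < 0.9
--         ):  # Climaxes in middle 70%
--             validated["climaxes"].append(beat)
--         elif (
--             beat_type == "resolution" and position_ratio > 0.6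
--         ):  # Resolutions in last 40%
--             validated["resolutions"].append(beat)
--
--     return validated
-- ===== SOURCE B (Python) =====
-- def _validate_narrative_structure(hooks, climaxes, resolutions, total_duration):
--     """Per-category: sort each beat list by start_ms, keep beats passing that
--     category's position rule. No merged tagging pass."""
--
--     def ratio(beat):
--         return beat["start_ms"] / total_duration if total_duration > 0 else 0
--
--     return {
--         "hooks": [b for b in sorted(hooks, key=lambda b: b["start_ms"]) if ratio(b) < 0.4],
--         "climaxes": [b for b in sorted(climaxes, key=lambda b: b["start_ms"]) if 0.2 < ratio(b) < 0.9],
--         "resolutions": [b for b in sorted(resolutions, key=lambda b: b["start_ms"]) if ratio(b) > 0.6],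
--     }
-- ===== Notes on version B (the rewrite author's own statement) =====
-- stated objective: simpler
-- what changed: B drops A's merge-and-tag pass entirely: instead of concatenating all beats with type tags, sorting the merged list and dispatching on the tag in one loop, B sorts each category independently and filters it with its own position rule in a comprehension.
import Mathlib
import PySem

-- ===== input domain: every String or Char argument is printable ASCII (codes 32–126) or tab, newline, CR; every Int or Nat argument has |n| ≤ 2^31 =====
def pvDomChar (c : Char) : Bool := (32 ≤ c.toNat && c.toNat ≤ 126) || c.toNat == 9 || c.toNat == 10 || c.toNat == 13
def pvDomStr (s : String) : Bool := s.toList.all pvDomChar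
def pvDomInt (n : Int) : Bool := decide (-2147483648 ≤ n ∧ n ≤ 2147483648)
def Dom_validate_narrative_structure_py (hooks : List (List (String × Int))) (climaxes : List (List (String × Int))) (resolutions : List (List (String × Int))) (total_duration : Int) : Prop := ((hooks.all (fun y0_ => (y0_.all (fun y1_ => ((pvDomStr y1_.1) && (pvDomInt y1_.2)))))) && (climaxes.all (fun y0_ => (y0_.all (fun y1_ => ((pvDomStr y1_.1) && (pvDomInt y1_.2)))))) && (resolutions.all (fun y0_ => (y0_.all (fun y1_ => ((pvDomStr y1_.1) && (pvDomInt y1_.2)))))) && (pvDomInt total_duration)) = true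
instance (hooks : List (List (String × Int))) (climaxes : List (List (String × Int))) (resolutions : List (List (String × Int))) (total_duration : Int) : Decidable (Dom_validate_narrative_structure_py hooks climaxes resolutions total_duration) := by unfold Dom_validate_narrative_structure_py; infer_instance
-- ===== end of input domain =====

-- B changes the decomposition only: A merges all beats into one tagged list, sorts it and
-- dispatches on the tag in a single loop; B sorts and filters each category independently.
--
-- FLOAT NOTE (both ports): Python compares the float `beat["start_ms"]/total_duration` with the
-- float literals 0.4, 0.2, 0.9, 0.6.  On the stated domain (|ints| ≤ 2^31) this is EXACTLY the
-- rational comparison with 2/5, 1/5, 9/10, 3/5: any ratio t/d with 0 < d ≤ 2^31 other than the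
-- threshold itself differs from it by ≥ 1/(10·2^31) ≈ 4.7e-11, while the double literals sit
-- within 2.3e-17 of the rationals and float division rounding is ≤ one ulp ≈ 2.3e-16; so both
-- ports use the exact integer comparisons (e.g. t/d < 0.4  ↔  5*t < 2*d).

-- ===== PORT A =====
-- beat["start_ms"]: first-match association-list lookup; Python raises KeyError when absent
-- (excluded by Pre_), so the default 0 is never reached on admitted inputs.
def pvStartMsA (b : List (String × Int)) : Int :=
  ((b.find? (fun p => p.1 == "start_ms")).map (·.2)).getD 0

def validate_narrative_structure_py (hooks : List (List (String × Int))) (climaxes : List (List (String × Int))) (resolutions : List (List (String × Int))) (total_duration : Int) : List (String × List (List (String × Int))) :=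
  -- all_beats = tagged concatenation, then stable sort by start_ms
  let all_beats : List ((List (String × Int)) × String) :=
    hooks.map (fun beat => (beat, "hook"))
      ++ climaxes.map (fun beat => (beat, "climax"))
      ++ resolutions.map (fun beat => (beat, "resolution"))
  let sortedBeats := PySem.List.sorted all_beats (fun x => pvStartMsA x.1) false
  -- validated = {"hooks": [], "climaxes": [], "resolutions": []} (fixed keys: kept as a triple)
  let v := sortedBeats.foldl
    (fun (acc : List (List (String × Int)) × List (List (String × Int)) × List (List (String × Int))) bt =>
      let t := pvStartMsA bt.1
      -- position_ratio = t/total_duration if total_duration > 0 else 0; float comparisons are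
      -- the exact integer comparisons below on the stated domain (see FLOAT NOTE)
      if bt.2 == "hook" && (if 0 < total_duration then decide (5 * t < 2 * total_duration) else true) then
        (acc.1 ++ [bt.1], acc.2.1, acc.2.2)
      else if bt.2 == "climax" && (if 0 < total_duration then decide (total_duration < 5 * t ∧ 10 * t < 9 * total_duration) else false) then
        (acc.1, acc.2.1 ++ [bt.1], acc.2.2)
      else if bt.2 == "resolution" && (if 0 < total_duration then decide (3 * total_duration < 5 * t) else false) then
        (acc.1, acc.2.1, acc.2.2 ++ [bt.1])
      else acc)
    ([], [], [])
  [("hooks", v.1), ("climaxes", v.2.1), ("resolutions", v.2.2)]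

-- ===== PORT B =====
def pvStartMsB (b : List (String × Int)) : Int :=
  ((b.find? (fun p => p.1 == "start_ms")).map (·.2)).getD 0

def validate_narrative_structure_py_alt (hooks : List (List (String × Int))) (climaxes : List (List (String × Int))) (resolutions : List (List (String × Int))) (total_duration : Int) : List (String × List (List (String × Int))) :=
  -- ratio(b) < 0.4 / 0.2 < ratio(b) < 0.9 / ratio(b) > 0.6, with ratio = 0 when total_duration ≤ 0;
  -- exact integer comparisons on the stated domain (see FLOAT NOTE)
  [("hooks",
      (PySem.List.sorted hooks pvStartMsB false).filter
        (fun b => if 0 < total_duration then decide (5 * pvStartMsB b < 2 * total_duration) else true)),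
   ("climaxes",
      (PySem.List.sorted climaxes pvStartMsB false).filter
        (fun b => if 0 < total_duration then decide (total_duration < 5 * pvStartMsB b ∧ 10 * pvStartMsB b < 9 * total_duration) else false)),
   ("resolutions",
      (PySem.List.sorted resolutions pvStartMsB false).filter
        (fun b => if 0 < total_duration then decide (3 * total_duration < 5 * pvStartMsB b) else false))]

-- ===== PRECONDITION & SPEC =====
-- Pre_ excludes exactly the inputs where Python raises KeyError: some beat without a "start_ms" key.
def Pre_validate_narrative_structure_py (hooks : List (List (String × Int))) (climaxes : List (List (String × Int))) (resolutions : List (List (String × Int))) (total_duration : Int) : Prop :=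
  ((hooks ++ climaxes ++ resolutions).all (fun b => b.any (fun p => p.1 == "start_ms"))) = true
instance (hooks : List (List (String × Int))) (climaxes : List (List (String × Int))) (resolutions : List (List (String × Int))) (total_duration : Int) : Decidable (Pre_validate_narrative_structure_py hooks climaxes resolutions total_duration) := by unfold Pre_validate_narrative_structure_py; infer_instance

def pvWitness_validate_narrative_structure_py : (List (List (String × Int))) × (List (List (String × Int))) × (List (List (String × Int))) × Int :=
  ([[("start_ms", 10)]], [[("start_ms", 50)]], [[("start_ms", 90)]], 100)

def Spec_validate_narrative_structure_py (hooks : List (List (String × Int))) (climaxes : List (List (String × Int))) (resolutions : List (List (String × Int))) (total_duration : Int) (out : List (String × List (List (String × Int)))) : Prop := out = validate_narrative_structure_py_alt hooks climaxes resolutions total_duration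
instance (hooks : List (List (String × Int))) (climaxes : List (List (String × Int))) (resolutions : List (List (String × Int))) (total_duration : Int) (out : List (String × List (List (String × Int)))) : Decidable (Spec_validate_narrative_structure_py hooks climaxes resolutions total_duration out) := by unfold Spec_validate_narrative_structure_py; infer_instance

-- ===== CLAIM (what is proved, stated in full; the proofs are below) =====
def Claim_equal_validate_narrative_structure_py : Prop := ∀ (hooks : List (List (String × Int))) (climaxes : List (List (String × Int))) (resolutions : List (List (String × Int))) (total_duration : Int), Dom_validate_narrative_structure_py hooks climaxes resolutions total_duration → Pre_validate_narrative_structure_py hooks climaxes resolutions total_duration → Spec_validate_narrative_structure_py hooks climaxes resolutions total_duration (validate_narrative_structure_py hooks climaxes resolutions total_duration)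

-- ===== LEMMAS AND PROOFS =====

-- Filtering commutes with inserting into a ≤-sorted list (one step of the stability argument).
theorem pv_filter_insertBy {α : Type} (key : α → Int) (p : α → Bool) (x : α) (l : List α)
    (hl : l.Pairwise (fun a b => key a ≤ key b)) :
    (PySem.List.insertBy (fun a b => decide (key a < key b)) x l).filter p
      = if p x then PySem.List.insertBy (fun a b => decide (key a < key b)) x (l.filter p)
        else l.filter p := by
  induction l with
  | nil => simp [PySem.List.insertBy]; split <;> simp_all
  | cons y ys ih =>
    rw [List.pairwise_cons] at hl
    obtain ⟨hy, hys⟩ := hl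
    by_cases hlt : key x < key y
    · have h1 : PySem.List.insertBy (fun a b => decide (key a < key b)) x (y :: ys) = x :: y :: ys := by
        simp [PySem.List.insertBy, hlt]
      rw [h1]
      by_cases hpy : p y = true
      · have h2 : (y :: ys).filter p = y :: ys.filter p := by simp [List.filter_cons, hpy]
        rw [h2]
        have h3 : PySem.List.insertBy (fun a b => decide (key a < key b)) x (y :: ys.filter p) = x :: y :: ys.filter p := by
          simp [PySem.List.insertBy, hlt]
        rw [h3]
        split <;> simp_all [List.filter_cons]
      · have h2 : (y :: ys).filter p = ys.filter p := by simp [List.filter_cons, hpy]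
        rw [h2]
        have hall : ∀ z ∈ ys.filter p, key x < key z := by
          intro z hz
          exact lt_of_lt_of_le hlt (hy z (List.mem_of_mem_filter hz))
        have h3 : PySem.List.insertBy (fun a b => decide (key a < key b)) x (ys.filter p) = x :: ys.filter p := by
          cases hfp : ys.filter p with
          | nil => simp [PySem.List.insertBy]
          | cons z zs =>
            have := hall z (by simp [hfp])
            simp [PySem.List.insertBy, this]
        rw [h3]
        split <;> simp_all [List.filter_cons, hpy]
    · have h1 : PySem.List.insertBy (fun a b => decide (key a < key b)) x (y :: ys) = y :: PySem.List.insertBy (fun a b => decide (key a < key b)) x ys := by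
        simp [PySem.List.insertBy, hlt]
      rw [h1]
      by_cases hpy : p y = true
      · have h2 : (y :: ys).filter p = y :: ys.filter p := by simp [List.filter_cons, hpy]
        have h3 : PySem.List.insertBy (fun a b => decide (key a < key b)) x (y :: ys.filter p) = y :: PySem.List.insertBy (fun a b => decide (key a < key b)) x (ys.filter p) := by
          simp [PySem.List.insertBy, hlt]
        rw [h2, h3, List.filter_cons_of_pos hpy, ih hys]
        split <;> rfl
      · have h2 : (y :: ys).filter p = ys.filter p := by simp [List.filter_cons, hpy]
        rw [h2, List.filter_cons_of_neg (by simpa using hpy), ih hys]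

-- Filtering commutes with the stable sort (stability: equal keys keep source order on both sides).
theorem pv_filter_sorted {α : Type} (key : α → Int) (p : α → Bool) (xs : List α) :
    (PySem.List.sorted xs key false).filter p = PySem.List.sorted (xs.filter p) key false := by
  induction xs using List.reverseRecOn with
  | nil => simp [PySem.List.sorted]
  | append_singleton ys x ih =>
    rw [PySem.List.sorted_eq_foldl_insertBy, List.foldl_append, ← PySem.List.sorted_eq_foldl_insertBy]
    simp only [List.foldl_cons, List.foldl_nil]
    rw [pv_filter_insertBy key p x _ (PySem.List.sorted_pairwise ys key), ih]
    by_cases hpx : p x = true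
    · rw [if_pos hpx, List.filter_append, List.filter_cons_of_pos hpx, List.filter_nil,
        PySem.List.sorted_eq_foldl_insertBy (ys.filter p ++ [x]), List.foldl_append,
        ← PySem.List.sorted_eq_foldl_insertBy]
      simp
    · rw [if_neg hpx, List.filter_append, List.filter_cons_of_neg (by simpa using hpx)]
      simp

-- Sorting a mapped list = mapping the sorted list when the key factors through the map.
theorem pv_sorted_map {α β : Type} (key : β → Int) (f : α → β) (xs : List α) :
    PySem.List.sorted (xs.map f) key false = (PySem.List.sorted xs (fun x => key (f x)) false).map f := by
  have ins : ∀ (x : α) (l : List α),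
      PySem.List.insertBy (fun a b => decide (key a < key b)) (f x) (l.map f)
        = (PySem.List.insertBy (fun a b => decide (key (f a) < key (f b))) x l).map f := by
    intro x l
    induction l with
    | nil => simp [PySem.List.insertBy]
    | cons y ys ih =>
      by_cases h : key (f x) < key (f y)
      · simp [PySem.List.insertBy, h]
      · simp [PySem.List.insertBy, h, ih]
  rw [PySem.List.sorted_eq_foldl_insertBy, PySem.List.sorted_eq_foldl_insertBy]
  induction xs using List.reverseRecOn with
  | nil => simp
  | append_singleton ys x ih =>
    simp only [List.map_append, List.map_cons, List.map_nil, List.foldl_append, List.foldl_cons, List.foldl_nil]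
    rw [ih, ins]

-- A's dispatch loop splits into three independent filters (the branch tags are mutually exclusive).
theorem pv_foldl_triple {α β : Type} (f : α → β) (pH pC pR : α → Bool)
    (hHC : ∀ x, pH x = true → pC x = false) (hHR : ∀ x, pH x = true → pR x = false)
    (hCR : ∀ x, pC x = true → pR x = false) :
    ∀ (L : List α) (a b c : List β),
    L.foldl (fun acc x =>
        if pH x then (acc.1 ++ [f x], acc.2.1, acc.2.2)
        else if pC x then (acc.1, acc.2.1 ++ [f x], acc.2.2)
        else if pR x then (acc.1, acc.2.1, acc.2.2 ++ [f x]) else acc) (a, b, c)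
      = (a ++ (L.filter pH).map f, b ++ (L.filter pC).map f, c ++ (L.filter pR).map f) := by
  intro L
  induction L with
  | nil => simp
  | cons x L ih =>
    intro a b c
    simp only [List.foldl_cons, List.filter_cons]
    cases hH : pH x with
    | true =>
      simp only [hH, if_true, hHC x hH, hHR x hH, if_false, ih, Bool.false_eq_true]
      simp
    | false =>
      cases hC : pC x with
      | true =>
        simp only [hH, hC, if_true, hCR x hC, if_false, ih, Bool.false_eq_true]
        simp
      | false =>
        cases hR : pR x with
        | true => simp only [hH, hC, hR, if_true, if_false, ih, Bool.false_eq_true]; simp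
        | false => simp only [hH, hC, hR, if_false, ih, Bool.false_eq_true]

-- One tagged category, extracted from the merged sorted list, is that category sorted (generic rule).
theorem pv_cat_hook_gen (cond : Int → Bool) (hooks climaxes resolutions : List (List (String × Int))) :
    ((PySem.List.sorted (hooks.map (fun b => (b, "hook")) ++ climaxes.map (fun b => (b, "climax")) ++ resolutions.map (fun b => (b, "resolution"))) (fun x => pvStartMsA x.1) false).filter
        (fun bt => bt.2 == "hook" && cond (pvStartMsA bt.1))).map (fun bt => bt.1)
      = (PySem.List.sorted hooks pvStartMsA false).filter (fun b => cond (pvStartMsA b)) := by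
  rw [pv_filter_sorted]
  simp only [List.filter_append, List.filter_map, Function.comp_def]
  simp only [String.reduceBEq, Bool.false_and, List.filter_false, beq_self_eq_true, Bool.true_and,
    List.map_nil, List.append_nil, List.nil_append]
  rw [pv_sorted_map]
  simp [← pv_filter_sorted, Function.comp_def]

theorem pv_cat_climax_gen (cond : Int → Bool) (hooks climaxes resolutions : List (List (String × Int))) :
    ((PySem.List.sorted (hooks.map (fun b => (b, "hook")) ++ climaxes.map (fun b => (b, "climax")) ++ resolutions.map (fun b => (b, "resolution"))) (fun x => pvStartMsA x.1) false).filter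
        (fun bt => bt.2 == "climax" && cond (pvStartMsA bt.1))).map (fun bt => bt.1)
      = (PySem.List.sorted climaxes pvStartMsA false).filter (fun b => cond (pvStartMsA b)) := by
  rw [pv_filter_sorted]
  simp only [List.filter_append, List.filter_map, Function.comp_def]
  simp only [String.reduceBEq, Bool.false_and, List.filter_false, beq_self_eq_true, Bool.true_and,
    List.map_nil, List.append_nil, List.nil_append]
  rw [pv_sorted_map]
  simp [← pv_filter_sorted, Function.comp_def]

theorem pv_cat_resolution_gen (cond : Int → Bool) (hooks climaxes resolutions : List (List (String × Int))) :
    ((PySem.List.sorted (hooks.map (fun b => (b, "hook")) ++ climaxes.map (fun b => (b, "climax")) ++ resolutions.map (fun b => (b, "resolution"))) (fun x => pvStartMsA x.1) false).filter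
        (fun bt => bt.2 == "resolution" && cond (pvStartMsA bt.1))).map (fun bt => bt.1)
      = (PySem.List.sorted resolutions pvStartMsA false).filter (fun b => cond (pvStartMsA b)) := by
  rw [pv_filter_sorted]
  simp only [List.filter_append, List.filter_map, Function.comp_def]
  simp only [String.reduceBEq, Bool.false_and, List.filter_false, beq_self_eq_true, Bool.true_and,
    List.map_nil, List.append_nil, List.nil_append]
  rw [pv_sorted_map]
  simp [← pv_filter_sorted, Function.comp_def]

theorem pvStartMs_eq : pvStartMsB = pvStartMsA := rfl

-- ===== VERDICT (by name: the statement is the Claim_ definition above) =====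
theorem validate_narrative_structure_py_spec : Claim_equal_validate_narrative_structure_py := by
  intro hooks climaxes resolutions d _ _
  unfold Spec_validate_narrative_structure_py
  simp only [validate_narrative_structure_py, validate_narrative_structure_py_alt, pvStartMs_eq]
  have hfold := pv_foldl_triple (fun bt : (List (String × Int)) × String => bt.1)
    (fun bt => bt.2 == "hook" && (if 0 < d then decide (5 * pvStartMsA bt.1 < 2 * d) else true))
    (fun bt => bt.2 == "climax" && (if 0 < d then decide (d < 5 * pvStartMsA bt.1 ∧ 10 * pvStartMsA bt.1 < 9 * d) else false))
    (fun bt => bt.2 == "resolution" && (if 0 < d then decide (3 * d < 5 * pvStartMsA bt.1) else false))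
    (by intro x hx; simp only [Bool.and_eq_true, beq_iff_eq] at hx; simp [hx.1])
    (by intro x hx; simp only [Bool.and_eq_true, beq_iff_eq] at hx; simp [hx.1])
    (by intro x hx; simp only [Bool.and_eq_true, beq_iff_eq] at hx; simp [hx.1])
    (PySem.List.sorted (hooks.map (fun beat => (beat, "hook")) ++ climaxes.map (fun beat => (beat, "climax")) ++ resolutions.map (fun beat => (beat, "resolution"))) (fun x => pvStartMsA x.1) false)
    [] [] []
  beta_reduce at hfold
  rw [hfold]
  simp only [List.nil_append]
  rw [pv_cat_hook_gen (fun t => if 0 < d then decide (5 * t < 2 * d) else true),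
    pv_cat_climax_gen (fun t => if 0 < d then decide (d < 5 * t ∧ 10 * t < 9 * d) else false),
    pv_cat_resolution_gen (fun t => if 0 < d then decide (3 * d < 5 * t) else false)]
  rfl
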